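-- pv_equiv track=rewrite | github.com/dariopicozzi/quantumsymmetry | src/quantumsymmetry/core.py | HartreeFock_ket
-- ===== SOURCE A (Python) =====
-- def HartreeFock_ket(mo_occ):
--     """Returns the Hartree-Fock computational basis state
--
--     Args:
--         mo_occ (1D array): molecular occupancies (array containing 0s, 1s and 2s)
--
--     Returns:
--         int: the Hartree-Fock computational basis state in decimal notation
--     """
--     ket = 0
--     for i, occ in enumerate(mo_occ):
--         if occ == 1:
--             ket += 4**i
--         if occ == 2:
--             ket += 3*4**i
--     return ket
-- ===== SOURCE B (Python) =====
-- def HartreeFock_ket(mo_occ):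
--     """Returns the Hartree-Fock computational basis state
--
--     Builds the base-4 digit string (most significant first) and parses it,
--     instead of summing weighted powers of 4.
--     """
--     digits = {1: '1', 2: '3'}
--     s = ''.join(digits.get(occ, '0') for occ in reversed(mo_occ))
--     return int(s, 4) if s else 0
-- ===== Notes on version B (the rewrite author's own statement) =====
-- stated objective: idiomatic
-- what changed: B builds the base-4 digit string (reversed occupancies mapped through a digit dict) and parses it with int(s, 4), instead of accumulating occ-weighted powers of 4 in a loop.
import Mathlib
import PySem

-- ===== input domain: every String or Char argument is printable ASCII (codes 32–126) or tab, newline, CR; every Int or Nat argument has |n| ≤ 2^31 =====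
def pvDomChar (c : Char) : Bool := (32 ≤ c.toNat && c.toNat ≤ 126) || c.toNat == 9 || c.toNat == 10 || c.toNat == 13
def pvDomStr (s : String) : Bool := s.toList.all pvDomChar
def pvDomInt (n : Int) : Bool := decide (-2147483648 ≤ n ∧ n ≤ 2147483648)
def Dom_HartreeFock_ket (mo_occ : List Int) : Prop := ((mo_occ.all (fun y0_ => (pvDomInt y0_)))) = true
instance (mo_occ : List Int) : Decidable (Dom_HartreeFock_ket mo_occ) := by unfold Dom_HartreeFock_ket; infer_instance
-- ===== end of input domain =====

-- B builds the base-4 digit string and parses it instead of summing occ-weighted powers of 4 (idiomatic rewrite, same cost).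

-- ===== PORT A =====
def HartreeFock_ket (mo_occ : List Int) : Int :=
  (PySem.List.enumerate mo_occ).foldl
    (fun ket p =>
      let ket := if p.2 == 1 then ket + 4 ^ p.1.toNat else ket
      if p.2 == 2 then ket + 3 * 4 ^ p.1.toNat else ket) 0

-- ===== PORT B =====
-- digits.get(occ, '0') from Source B
def hfDigit (occ : Int) : Char := if occ == 1 then '1' else if occ == 2 then '3' else '0'
-- value of one base-4 digit character as produced by hfDigit
def hfDigitVal (c : Char) : Int := if c == '1' then 1 else if c == '3' then 3 else 0
def HartreeFock_ket_alt (mo_occ : List Int) : Int :=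
  let s : List Char := mo_occ.reverse.map hfDigit
  -- int(s, 4) ported by hand: most-significant-first fold; exact on strings of digits '0'..'3'
  if s.isEmpty then 0 else s.foldl (fun acc c => acc * 4 + hfDigitVal c) 0

-- ===== PRECONDITION & SPEC =====
def Spec_HartreeFock_ket (mo_occ : List Int) (out : Int) : Prop := out = HartreeFock_ket_alt mo_occ
instance (mo_occ : List Int) (out : Int) : Decidable (Spec_HartreeFock_ket mo_occ out) := by unfold Spec_HartreeFock_ket; infer_instance

-- ===== CLAIM (what is proved, stated in full; the proofs are below) =====
def Claim_equal_HartreeFock_ket : Prop := ∀ (mo_occ : List Int), Dom_HartreeFock_ket mo_occ → Spec_HartreeFock_ket mo_occ (HartreeFock_ket mo_occ)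

-- ===== LEMMAS AND PROOFS =====

-- digit value of occupancy occ
def hfD (occ : Int) : Int := if occ == 1 then 1 else if occ == 2 then 3 else 0

-- reference value: base-4 number with head as least-significant digit
def hfVal : List Int → Int
  | [] => 0
  | x :: xs => hfD x + 4 * hfVal xs

theorem hfDigitVal_hfDigit (occ : Int) : hfDigitVal (hfDigit occ) = hfD occ := by
  unfold hfDigitVal hfDigit hfD
  by_cases h1 : occ == 1 <;> by_cases h2 : occ == 2 <;> simp [h1, h2]

theorem foldA_eq (l : List Int) : ∀ (s acc : Int), 0 ≤ s →
    (PySem.List.enumerate l s).foldl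
      (fun ket p =>
        let ket := if p.2 == 1 then ket + 4 ^ p.1.toNat else ket
        if p.2 == 2 then ket + 3 * 4 ^ p.1.toNat else ket) acc
      = acc + 4 ^ s.toNat * hfVal l := by
  induction l with
  | nil => intro s acc _; simp [PySem.List.enumerate_nil, hfVal]
  | cons x xs ih =>
    intro s acc hs
    rw [PySem.List.enumerate_cons, List.foldl_cons]
    have h1 : (0:Int) ≤ s + 1 := by omega
    rw [ih (s+1) _ h1]
    have ht : (s + 1).toNat = s.toNat + 1 := by omega
    rw [ht, hfVal]
    simp only [hfD]
    by_cases hx1 : x == 1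
    · have hx2 : (x == 2) = false := by
        simp only [beq_iff_eq] at hx1
        subst hx1
        decide
      simp [hx1, hx2]
      ring
    · by_cases hx2 : x == 2 <;> simp [hx1, hx2] <;> ring

theorem foldB_eq (l : List Int) : ∀ (a : Int),
    (List.map hfDigit l.reverse).foldl (fun acc c => acc * 4 + hfDigitVal c) a
      = a * 4 ^ l.length + hfVal l := by
  induction l with
  | nil => intro a; simp [hfVal]
  | cons x xs ih =>
    intro a
    simp only [List.reverse_cons, List.map_append, List.foldl_append, List.map_cons,
      List.map_nil, List.foldl_cons, List.foldl_nil, ih, hfDigitVal_hfDigit, List.length_cons,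
      hfVal]
    ring

-- ===== VERDICT (by name: the statement is the Claim_ definition above) =====
theorem HartreeFock_ket_spec : Claim_equal_HartreeFock_ket := by
  intro mo_occ _
  unfold Spec_HartreeFock_ket HartreeFock_ket HartreeFock_ket_alt
  rw [foldA_eq mo_occ 0 0 le_rfl]
  cases mo_occ with
  | nil => simp [hfVal]
  | cons x xs =>
    have hne : (List.map hfDigit ((x :: xs)).reverse).isEmpty = false := by simp
    simp only [hne, Bool.false_eq_true, if_false, foldB_eq]
    simp
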